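-- pv_equiv track=rewrite | github.com/cfpb/Metro2 | django/evaluate_m2/metadata_utils.py | parse_fields_used_from_csv
-- ===== SOURCE A (Python) =====
-- def parse_fields_used_from_csv(input: str):
--     """
--     In the source of truth spreadsheet, the 'fields used' column
--     is a newline-delimited string with section headers to indicate
--     which fields are 'fields_used' vs 'fields_display'. Get the
--     appropriate items and return them as a list.
--     """
--     input_list = input.splitlines()
--     # Remove trailing whitespace in each item in list
--     input_list = [x.rstrip() for x in input_list]
--     header = 'Fields used for evaluator'
--     try:
--         start = input_list.index(header)
--         try:
--             end = input_list[start:].index('')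
--             # Return all items between the header and the next blank line
--             items = input_list[start+1:start+end]
--         except ValueError:
--             # If no blank line after header, return all items after header
--             items = input_list[start+1:]
--     except ValueError:
--         # If the header isn't present, return all items
--         items = input_list
--
--     # Filter out blank lines
--     return list(filter(len, items))
-- ===== SOURCE B (Python) =====
-- def parse_fields_used_from_csv(input: str):
--     lines = [x.rstrip() for x in input.splitlines()]
--     header = 'Fields used for evaluator'
--     # Stage 1: partition the lines into maximal blocks of consecutive non-blank lines.
--     blocks = []
--     current = []
--     for line in lines:
--         if line:
--             current.append(line)
--         elif current:
--             blocks.append(current)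
--             current = []
--     if current:
--         blocks.append(current)
--     # Stage 2: the wanted fields are the remainder, after the first header
--     # occurrence, of the first block containing the header.
--     for block in blocks:
--         if header in block:
--             j = block.index(header)
--             return block[j + 1:]
--     # Header absent: every non-blank line, i.e. the blocks flattened.
--     return [line for block in blocks for line in block]
-- ===== Notes on version B (the rewrite author's own statement) =====
-- stated objective: alternative
-- what changed: Instead of locating the header with .index, searching for a blank terminator and slicing twice (with a final blank filter), B first partitions the stripped lines into blank-separated blocks and then returns the remainder of the first block containing the header, or the blocks flattened when the header is absent.
import Mathlib
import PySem

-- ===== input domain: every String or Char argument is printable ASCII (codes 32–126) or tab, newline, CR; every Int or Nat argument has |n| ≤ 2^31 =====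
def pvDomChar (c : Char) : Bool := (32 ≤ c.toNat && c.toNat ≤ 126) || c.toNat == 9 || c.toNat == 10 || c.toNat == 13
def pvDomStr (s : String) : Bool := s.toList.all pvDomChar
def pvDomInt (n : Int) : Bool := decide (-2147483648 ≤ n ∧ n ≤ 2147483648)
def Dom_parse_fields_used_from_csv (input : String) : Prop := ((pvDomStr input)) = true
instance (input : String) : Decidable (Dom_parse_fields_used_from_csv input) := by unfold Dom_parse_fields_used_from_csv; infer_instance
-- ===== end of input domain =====

-- B replaces A's header-index + blank-terminator-index + double slice + final filter by a two-stage
-- decomposition: partition the lines into blank-separated blocks, then return the remainder of the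
-- first block containing the header (or the blocks flattened if the header is absent). Objective: alternative.

-- ===== PORT A =====
def parse_fields_used_from_csv (input : String) : List String :=
  let input_list := (PySem.Str.splitlines input).map PySem.Str.rstrip
  let header := "Fields used for evaluator"
  let items :=
    match PySem.List.index? input_list header with
    | some start =>
      match PySem.List.index? (PySem.List.slice input_list (some (start : Int)) none) "" with
      | some e =>
        PySem.List.slice input_list (some ((start : Int) + 1)) (some ((start : Int) + (e : Int)))
      | none =>
        PySem.List.slice input_list (some ((start : Int) + 1)) none
    | none => input_list
  items.filter (fun x => PySem.Str.len x != 0)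

-- ===== PORT B =====
-- stage 1: 'for line in lines: if line: current.append(line) elif current: blocks.append(current); …'
def pvBlocks : List String → List String → List (List String)
  | cur, [] => if cur = [] then [] else [cur]
  | cur, l :: rest =>
    if l ≠ "" then pvBlocks (cur ++ [l]) rest
    else if cur ≠ [] then cur :: pvBlocks [] rest
    else pvBlocks [] rest

-- stage 2: 'for block in blocks: if header in block: return block[block.index(header)+1:]'
def pvFindBlock : List (List String) → Option (List String)
  | [] => none
  | b :: bs =>
    match PySem.List.index? b "Fields used for evaluator" with
    | some j => some (b.drop (j + 1))
    | none => pvFindBlock bs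

def parse_fields_used_from_csv_alt (input : String) : List String :=
  let lines := (PySem.Str.splitlines input).map PySem.Str.rstrip
  let blocks := pvBlocks [] lines
  match pvFindBlock blocks with
  | some items => items
  | none => blocks.flatMap id

-- ===== PRECONDITION & SPEC =====
def Spec_parse_fields_used_from_csv (input : String) (out : List String) : Prop := out = parse_fields_used_from_csv_alt input
instance (input : String) (out : List String) : Decidable (Spec_parse_fields_used_from_csv input out) := by unfold Spec_parse_fields_used_from_csv; infer_instance

-- ===== CLAIM (what is proved, stated in full; the proofs are below) =====
def Claim_equal_parse_fields_used_from_csv : Prop := ∀ (input : String), Dom_parse_fields_used_from_csv input → Spec_parse_fields_used_from_csv input (parse_fields_used_from_csv input)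

-- ===== LEMMAS AND PROOFS =====

-- the prefix of a list up to (excluding) its first blank line
def pvCollect : List String → List String
  | [] => []
  | l :: rest => if l = "" then [] else l :: pvCollect rest

def pvHdr : String := "Fields used for evaluator"

theorem pv_len_ne_zero (x : String) : (PySem.Str.len x != 0) = (x != "") := by
  by_cases h : x = ""
  · subst h; decide
  · have hlen : x.length ≠ 0 := fun h0 => h (String.length_eq_zero_iff.mp h0)
    rw [show (x != "") = true from by simp [h]]
    simp [PySem.Str.len]
    exact h

theorem pv_filter_len (l : List String) :
    l.filter (fun x => PySem.Str.len x != 0) = l.filter (fun x => x != "") := by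
  apply List.filter_congr
  intro x _
  exact pv_len_ne_zero x

theorem pv_collect_no_blank (l : List String) (h : "" ∉ l) : pvCollect l = l := by
  induction l with
  | nil => rfl
  | cons a t ih =>
    simp at h
    simp [pvCollect, h.1, ih h.2]

theorem pv_collect_append (pre suf : List String) (h : "" ∉ pre) :
    pvCollect (pre ++ "" :: suf) = pre := by
  induction pre with
  | nil => simp [pvCollect]
  | cons a t ih =>
    simp at h
    simp [pvCollect, h.1, ih h.2]

theorem pv_filter_no_blank (l : List String) (h : "" ∉ l) : l.filter (fun x => x != "") = l := by
  apply List.filter_eq_self.mpr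
  intro x hx
  simp
  intro he; exact h (he ▸ hx)

-- a blank-free block containing no header is skipped by the block scan
theorem pv_find_cons (b : List String) (bs : List (List String)) (h : pvHdr ∉ b) :
    pvFindBlock (b :: bs) = pvFindBlock bs := by
  have hn : PySem.List.index? b "Fields used for evaluator" = none :=
    (PySem.List.index?_eq_none_iff _ _).mpr (by rwa [pvHdr] at h)
  simp only [pvFindBlock]
  rw [hn]

-- the first block produced by pvBlocks from a nonempty accumulator
theorem pv_blocks_first (lines : List String) : ∀ (cur : List String), cur ≠ [] →
    ∃ tl, pvBlocks cur lines = (cur ++ pvCollect lines) :: tl := by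
  induction lines with
  | nil => intro cur hc; exact ⟨[], by simp [pvBlocks, hc, pvCollect]⟩
  | cons l rest ih =>
    intro cur hc
    by_cases hl : l = ""
    · subst hl
      exact ⟨pvBlocks [] rest, by simp [pvBlocks, hc, pvCollect]⟩
    · obtain ⟨tl, htl⟩ := ih (cur ++ [l]) (by simp)
      exact ⟨tl, by simp [pvBlocks, hl, htl, pvCollect]⟩

-- header absent: no block matches, and the blocks flatten to the non-blank lines
theorem pv_blocks_absent (lines : List String) : ∀ (cur : List String),
    "" ∉ cur → pvHdr ∉ cur → pvHdr ∉ lines →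
    pvFindBlock (pvBlocks cur lines) = none ∧
    (pvBlocks cur lines).flatMap id = cur ++ lines.filter (fun x => x != "") := by
  induction lines with
  | nil =>
    intro cur _ hch _
    constructor
    · by_cases hc : cur = []
      · simp [pvBlocks, hc, pvFindBlock]
      · simp only [pvBlocks, if_neg hc]
        rw [pv_find_cons _ _ hch]; rfl
    · by_cases hc : cur = [] <;> simp [pvBlocks, hc]
  | cons l rest ih =>
    intro cur hcb hch hlh
    simp [pvHdr] at hlh
    by_cases hl : l = ""
    · subst hl
      by_cases hc : cur = []
      · subst hc
        simpa [pvBlocks] using ih [] (by simp) (by simp) (by simp [pvHdr, hlh.2])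
      · obtain ⟨hf, hfl⟩ := ih [] (by simp) (by simp) (by simp [pvHdr, hlh.2])
        refine ⟨?_, ?_⟩
        · simp only [pvBlocks, if_neg (by simp : ¬("" : String) ≠ ""), if_pos hc]
          rw [pv_find_cons _ _ hch]; exact hf
        · simp [pvBlocks, hc, hfl]
    · have hlhd : l ≠ pvHdr := fun he => hlh.1 (by rw [pvHdr] at he; exact he.symm)
      obtain ⟨hf, hfl⟩ := ih (cur ++ [l])
        (by simp [hcb, Ne.symm hl]) (by simp [hch]; exact fun he => hlhd he.symm)
        (by simp [pvHdr, hlh.2])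
      refine ⟨?_, ?_⟩
      · simpa [pvBlocks, hl] using hf
      · simp [pvBlocks, hl, hfl]

-- header present: the scan over the blocks returns the collect-until-blank of the suffix
theorem pv_blocks_found (pre : List String) : ∀ (cur suf : List String),
    "" ∉ cur → pvHdr ∉ cur → pvHdr ∉ pre →
    pvFindBlock (pvBlocks cur (pre ++ pvHdr :: suf)) = some (pvCollect suf) := by
  induction pre with
  | nil =>
    intro cur suf _ hch _
    have hne : pvHdr ≠ "" := by decide
    obtain ⟨tl, htl⟩ := pv_blocks_first suf (cur ++ [pvHdr]) (by simp)
    simp only [List.nil_append, pvBlocks, if_pos hne]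
    rw [htl]
    have hidx : PySem.List.index? ((cur ++ [pvHdr]) ++ pvCollect suf) pvHdr = some cur.length := by
      apply (PySem.List.index?_eq_some_iff _ _ _).mpr
      exact ⟨cur, pvCollect suf, by simp, rfl, hch⟩
    have hdl : (cur ++ [pvHdr] ++ pvCollect suf).drop (cur.length + 1) = pvCollect suf := by
      rw [show cur.length + 1 = (cur ++ [pvHdr]).length from by simp]
      exact List.drop_left
    simp only [pvFindBlock]
    rw [show ("Fields used for evaluator" : String) = pvHdr from rfl, hidx]
    show some ((cur ++ [pvHdr] ++ pvCollect suf).drop (cur.length + 1)) = some (pvCollect suf)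
    rw [hdl]
  | cons p pre' ih =>
    intro cur suf hcb hch hpm
    simp [pvHdr] at hpm
    by_cases hp : p = ""
    · subst hp
      by_cases hc : cur = []
      · subst hc
        simpa [pvBlocks] using ih [] suf (by simp) (by simp) (by simp [pvHdr, hpm.2])
      · simp only [List.cons_append, pvBlocks, if_neg (by simp : ¬("" : String) ≠ ""), if_pos hc]
        rw [pv_find_cons _ _ hch]
        exact ih [] suf (by simp) (by simp) (by simp [pvHdr, hpm.2])
    · have hphd : p ≠ pvHdr := fun he => hpm.1 (by rw [pvHdr] at he; exact he.symm)
      have := ih (cur ++ [p]) suf (by simp [hcb, Ne.symm hp])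
        (by simp [hch]; exact fun he => hphd he.symm) (by simp [pvHdr, hpm.2])
      simpa [pvBlocks, hp] using this

-- ===== VERDICT (by name: the statement is the Claim_ definition above) =====
theorem parse_fields_used_from_csv_spec : Claim_equal_parse_fields_used_from_csv := by
  intro input _
  unfold Spec_parse_fields_used_from_csv parse_fields_used_from_csv parse_fields_used_from_csv_alt
  set lines := (PySem.Str.splitlines input).map PySem.Str.rstrip with hlines
  cases hidx : PySem.List.index? lines "Fields used for evaluator" with
  | none =>
    have hlh : pvHdr ∉ lines := by
      rw [pvHdr, ← PySem.List.index?_eq_none_iff (xs := lines)]; exact hidx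
    obtain ⟨hf, hfl⟩ := pv_blocks_absent lines [] (by simp) (by simp) hlh
    simp only [hidx, hf, hfl]
    simpa using pv_filter_len lines
  | some start =>
    obtain ⟨pre, suf, hsplit, hlen, hpm⟩ := (PySem.List.index?_eq_some_iff _ _ _).mp hidx
    have hfound := pv_blocks_found pre [] suf (by simp) (by simp) (by rw [pvHdr]; exact hpm)
    rw [show pre ++ pvHdr :: suf = lines from by rw [hsplit, pvHdr]] at hfound
    have hdrop : lines.drop start = "Fields used for evaluator" :: suf := by
      rw [hsplit, ← hlen]; simp
    have hdrop1 : lines.drop (start + 1) = suf := by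
      rw [hsplit, ← hlen]
      induction pre with
      | nil => simp
      | cons a t ih2 => simp
    have hne : "Fields used for evaluator" ≠ "" := by decide
    have hcons := PySem.List.index?_cons_of_ne (xs := suf) hne
    simp only [hidx, hfound, PySem.List.slice_from_natCast, hdrop, hcons]
    cases hidx2 : PySem.List.index? suf "" with
    | none =>
      simp only [Option.map_none]
      have hcast : ((start : Int) + 1) = ((start + 1 : Nat) : Int) := by push_cast; ring
      rw [hcast, PySem.List.slice_from_natCast, hdrop1]
      have hnb : "" ∉ suf := by
        rw [← PySem.List.index?_eq_none_iff (xs := suf) (v := "")]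
        exact hidx2
      rw [pv_filter_len, pv_filter_no_blank _ hnb, pv_collect_no_blank _ hnb]
    | some m =>
      obtain ⟨p2, s2, hs2, hl2, hnb2⟩ := (PySem.List.index?_eq_some_iff _ _ _).mp hidx2
      simp only [Option.map_some]
      have hcast : ((start : Int) + 1) = ((start + 1 : Nat) : Int) := by push_cast; ring
      have hcast2 : ((start : Int) + ((m + 1 : Nat) : Int)) = ((start + 1 + m : Nat) : Int) := by
        push_cast; ring
      rw [hcast, hcast2, PySem.List.slice_natCast, hdrop1, hs2]
      have htake : (p2 ++ "" :: s2).take (start + 1 + m - (start + 1)) = p2 := by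
        have hm : start + 1 + m - (start + 1) = m := by omega
        rw [hm, ← hl2]
        simp
      rw [htake, pv_collect_append _ _ hnb2, pv_filter_len, pv_filter_no_blank _ hnb2]
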